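-- pv_equiv track=rewrite | github.com/mjvdw/daily-attendance-report | main.py | separate_columns
-- ===== SOURCE A (Python) =====
-- COLUMN_WIDTHS = [7, 7, 9, 8, 8, 8, 8, 8, 8, 8, 8, 8, 8, 8, 8, 8, 8, 8, 8, 13]
--
-- def separate_columns(string):
--     start = 0
--     columns = []
--
--     for width in COLUMN_WIDTHS:
--         end = start + width
--         value = string[start:end].strip()
--         columns.append(value)
--         start += width
--
--     return columns
-- ===== SOURCE B (Python) =====
-- COLUMN_WIDTHS = [7, 7, 9, 8, 8, 8, 8, 8, 8, 8, 8, 8, 8, 8, 8, 8, 8, 8, 8, 13]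
--
--
-- def _go(s, widths):
--     # Peel the first column off the front of the string and recurse on the rest.
--     if not widths:
--         return []
--     w = widths[0]
--     return [s[:w].strip()] + _go(s[w:], widths[1:])
--
--
-- def separate_columns(string):
--     return _go(string, COLUMN_WIDTHS)
-- ===== Notes on version B (the rewrite author's own statement) =====
-- stated objective: alternative
-- what changed: B is recursive and consumes the string itself: it peels the first column off the front (s[:w]) and recurses on the remainder s[w:] with the remaining widths, instead of A's iterative loop indexing the whole string with a running start offset.
import Mathlib
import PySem

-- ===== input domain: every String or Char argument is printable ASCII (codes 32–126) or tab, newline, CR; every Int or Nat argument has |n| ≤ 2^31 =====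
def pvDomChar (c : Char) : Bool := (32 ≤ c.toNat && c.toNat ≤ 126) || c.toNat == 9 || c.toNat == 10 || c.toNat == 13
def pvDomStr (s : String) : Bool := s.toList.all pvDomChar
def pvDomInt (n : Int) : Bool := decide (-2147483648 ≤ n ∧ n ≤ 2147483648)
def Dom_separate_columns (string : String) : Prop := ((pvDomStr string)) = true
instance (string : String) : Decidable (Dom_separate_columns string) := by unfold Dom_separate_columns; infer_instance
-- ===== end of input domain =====

-- B replaces A's loop (absolute indices into the whole string via a running start)
-- by a recursion that consumes the string: strip the w-char prefix, recurse on the rest.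

-- ===== PORT A =====
def pyCOLUMN_WIDTHS : List Int := [7, 7, 9, 8, 8, 8, 8, 8, 8, 8, 8, 8, 8, 8, 8, 8, 8, 8, 8, 13]

def separate_columns (string : String) : List String :=
  (pyCOLUMN_WIDTHS.foldl
    (fun (st : Int × List String) width =>
      let start := st.1
      let columns := st.2
      let e := start + width
      let value := PySem.Str.strip (PySem.Str.slice string (some start) (some e))
      (start + width, columns ++ [value]))
    (0, [])).2

-- ===== PORT B =====
-- _go(s, widths): peel the first column off the front of the string, recurse on the rest.
def pvGo (s : String) : List Int → List String
  | [] => []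
  | w :: ws =>
      [PySem.Str.strip (PySem.Str.slice s none (some w))]
        ++ pvGo (PySem.Str.slice s (some w) none) ws

def separate_columns_alt (string : String) : List String :=
  pvGo string pyCOLUMN_WIDTHS

-- ===== PRECONDITION & SPEC =====
def Spec_separate_columns (string : String) (out : List String) : Prop := out = separate_columns_alt string
instance (string : String) (out : List String) : Decidable (Spec_separate_columns string out) := by unfold Spec_separate_columns; infer_instance

-- ===== CLAIM (what is proved, stated in full; the proofs are below) =====
def Claim_equal_separate_columns : Prop := ∀ (string : String), Dom_separate_columns string → Spec_separate_columns string (separate_columns string)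

-- ===== LEMMAS AND PROOFS =====

-- suffix[0:w] is the absolute slice [a:a+w]
lemma pv_slice_prefix (s : String) (a w : Nat) :
    PySem.Str.slice (PySem.Str.slice s (some (a:Int)) none) none (some (w:Int))
      = PySem.Str.slice s (some (a:Int)) (some ((a:Int)+(w:Int))) := by
  apply String.toList_injective
  simp [PySem.Str.toList_slice, PySem.List.slice_from_natCast, PySem.List.slice_to_natCast,
    PySem.List.slice_natCast_add]

-- dropping w more characters from the suffix at a gives the suffix at a+w
lemma pv_slice_suffix (s : String) (a w : Nat) :
    PySem.Str.slice (PySem.Str.slice s (some (a:Int)) none) (some (w:Int)) none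
      = PySem.Str.slice s (some ((a:Int)+(w:Int))) none := by
  apply String.toList_injective
  simp [PySem.Str.toList_slice, PySem.List.slice_from_natCast]
  rw [← Nat.cast_add, PySem.List.slice_from_natCast]

-- loop invariant: A's fold from (start, acc) returns acc ++ B's recursion on the suffix at start
lemma pv_loop_eq (s : String) (ws : List Int) (h : ∀ w ∈ ws, 0 ≤ w) :
    ∀ (a : Nat) (acc : List String),
      (ws.foldl
        (fun (st : Int × List String) width =>
          ((st.1 + width : Int),
            st.2 ++ [PySem.Str.strip (PySem.Str.slice s (some st.1) (some (st.1 + width)))]))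
        ((a : Int), acc)).2
      = acc ++ pvGo (PySem.Str.slice s (some (a:Int)) none) ws := by
  induction ws with
  | nil => intro a acc; simp [pvGo]
  | cons w ws ih =>
      intro a acc
      obtain ⟨n, rfl⟩ := Int.eq_ofNat_of_zero_le (h w (List.mem_cons_self ..))
      have hws : ∀ w ∈ ws, 0 ≤ w := fun w hw => h w (List.mem_cons_of_mem _ hw)
      have := ih hws (a + n)
        (acc ++ [PySem.Str.strip (PySem.Str.slice s (some (a:Int)) (some ((a:Int)+(n:Int))))])
      simp only [List.foldl_cons, pvGo, pv_slice_prefix, pv_slice_suffix]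
      push_cast at this ⊢
      rw [this, List.append_assoc]

lemma pv_slice_zero (s : String) : PySem.Str.slice s (some ((0:Nat):Int)) none = s := by
  apply String.toList_injective
  simp [PySem.Str.toList_slice]

-- ===== VERDICT (by name: the statement is the Claim_ definition above) =====
theorem separate_columns_spec : Claim_equal_separate_columns := by
  intro s _
  unfold Spec_separate_columns separate_columns separate_columns_alt
  have h : ∀ w ∈ pyCOLUMN_WIDTHS, (0:Int) ≤ w := by decide
  have := pv_loop_eq s pyCOLUMN_WIDTHS h 0 []
  rw [pv_slice_zero] at this
  simpa using this
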